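-- pv_equiv track=rewrite | github.com/authmane512/sort_todo.txt | sort_todo.py | sort_tasks
-- ===== SOURCE A (Python) =====
-- def sort_tasks(tasks, char): # char is either @ or +
--   sorted_tasks = {}
--   for t in tasks:
--     proj_or_context_list = []
--     words = t.split()
--     for w in words:
--       if w.startswith(char) and len(w) != 1:
--         proj_or_context_list.append(w)
--
--     special_proj_or_context_list = tuple(filter(lambda x: x.startswith('+_'), proj_or_context_list))
--     if special_proj_or_context_list != ():
--       if "+_done" in proj_or_context_list:
--         proj_or_context = "+_done"
--       elif "+_failed" in proj_or_context_list:
--         proj_or_context = "+_failed"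
--       else:
--         proj_or_context = special_proj_or_context_list[0]
--     else:
--       proj_or_context = '' if proj_or_context_list == [] else proj_or_context_list[0]
--
--     if proj_or_context not in sorted_tasks:
--       sorted_tasks[proj_or_context] = []
--     sorted_tasks[proj_or_context].append(t)
--
--   return sorted_tasks
-- ===== SOURCE B (Python) =====
-- def get_key(task, char):
--   # one pass over the words, keeping only scalars
--   first_candidate = None
--   first_special = None
--   has_done = False
--   has_failed = False
--   for w in task.split():
--     if w.startswith(char) and len(w) != 1:
--       if first_candidate is None:
--         first_candidate = w
--       if w.startswith('+_'):
--         if first_special is None: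
--           first_special = w
--         if w == '+_done':
--           has_done = True
--         elif w == '+_failed':
--           has_failed = True
--   if first_special is not None:
--     if has_done:
--       return '+_done'
--     if has_failed:
--       return '+_failed'
--     return first_special
--   return first_candidate or ''
--
--
-- def sort_tasks(tasks, char):
--   sorted_tasks = {}
--   for t in tasks:
--     sorted_tasks.setdefault(get_key(t, char), []).append(t)
--   return sorted_tasks
-- ===== Notes on version B (the rewrite author's own statement) =====
-- stated objective: alternative
-- what changed: The key is computed by a helper in one pass over the words maintaining only four scalars (first candidate, first '+_' special, has_done, has_failed) instead of materialising the candidate list, filtering it into a tuple, and doing membership scans; the grouping dict is filled with setdefault.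
import Mathlib
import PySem

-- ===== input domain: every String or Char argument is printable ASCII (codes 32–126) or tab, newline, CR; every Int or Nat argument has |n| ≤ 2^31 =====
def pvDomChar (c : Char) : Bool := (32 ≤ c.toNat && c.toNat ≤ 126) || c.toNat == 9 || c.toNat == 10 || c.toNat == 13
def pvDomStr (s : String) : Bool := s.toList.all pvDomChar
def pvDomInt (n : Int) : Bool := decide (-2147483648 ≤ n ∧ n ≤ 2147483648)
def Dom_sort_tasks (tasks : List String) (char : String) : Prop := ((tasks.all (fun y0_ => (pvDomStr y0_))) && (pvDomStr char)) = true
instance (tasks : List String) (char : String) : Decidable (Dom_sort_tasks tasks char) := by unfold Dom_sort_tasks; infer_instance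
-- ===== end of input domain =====

-- B computes each task's grouping key in ONE pass over its words with four scalar accumulators
-- instead of building and re-scanning candidate lists (objective: alternative decomposition).


-- ===== PORT A =====
-- A-side helper: the per-task key computation lifted out of A's loop body (same code, step for step)
def pvKeyA (t : String) (char : String) : String :=
  let pocList := (PySem.Str.split₀ t).foldl
    (fun acc w => if PySem.Str.startswith w char && PySem.Str.len w != 1 then acc ++ [w] else acc) []
  let specials := pocList.filter (fun x => PySem.Str.startswith x "+_")
  match specials with
  | s :: _ =>
      if pocList.contains "+_done" then "+_done"
      else if pocList.contains "+_failed" then "+_failed"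
      else s
  | [] => pocList.headD ""

def sort_tasks (tasks : List String) (char : String) : List (String × List String) :=
  (tasks.foldl
    (fun (d : PySem.Dict String (List String)) t =>
      let k := pvKeyA t char
      let d := if d.contains k = false then d.insert k [] else d
      d.modify k [] (fun l => l ++ [t]))
    PySem.Dict.empty).items

-- ===== PORT B =====
-- B-side helper: one pass over the words, four scalar accumulators
def pvGetKey (task : String) (char : String) : String :=
  let st := (PySem.Str.split₀ task).foldl
    (fun (s : Option String × Option String × Bool × Bool) w =>
      let (fc, fs, hd, hf) := s
      if PySem.Str.startswith w char && PySem.Str.len w != 1 then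
        let fc := if fc.isNone then some w else fc
        if PySem.Str.startswith w "+_" then
          let fs := if fs.isNone then some w else fs
          if w = "+_done" then (fc, fs, true, hf)
          else if w = "+_failed" then (fc, fs, hd, true)
          else (fc, fs, hd, hf)
        else (fc, fs, hd, hf)
      else (fc, fs, hd, hf))
    (none, none, false, false)
  match st with
  | (fc, fs, hd, hf) =>
    match fs with
    | some s => if hd then "+_done" else if hf then "+_failed" else s
    | none => fc.getD ""

def sort_tasks_alt (tasks : List String) (char : String) : List (String × List String) :=
  (tasks.foldl
    (fun (d : PySem.Dict String (List String)) t =>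
      (d.setdefault (pvGetKey t char) []).modify (pvGetKey t char) [] (fun l => l ++ [t]))
    PySem.Dict.empty).items

-- ===== PRECONDITION & SPEC =====
def Spec_sort_tasks (tasks : List String) (char : String) (out : List (String × List String)) : Prop := out = sort_tasks_alt tasks char
instance (tasks : List String) (char : String) (out : List (String × List String)) : Decidable (Spec_sort_tasks tasks char out) := by unfold Spec_sort_tasks; infer_instance

-- ===== CLAIM (what is proved, stated in full; the proofs are below) =====
def Claim_equal_sort_tasks : Prop := ∀ (tasks : List String) (char : String), Dom_sort_tasks tasks char → Spec_sort_tasks tasks char (sort_tasks tasks char)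

-- ===== LEMMAS AND PROOFS =====

-- B's scalar fold, characterised by the filtered word lists
set_option maxHeartbeats 2000000 in
theorem pvFold_char (char : String) (ws : List String) (fc fs : Option String) (hd hf : Bool) :
    ws.foldl
      (fun (s : Option String × Option String × Bool × Bool) w =>
        let (fc, fs, hd, hf) := s
        if PySem.Str.startswith w char && PySem.Str.len w != 1 then
          let fc := if fc.isNone then some w else fc
          if PySem.Str.startswith w "+_" then
            let fs := if fs.isNone then some w else fs
            if w = "+_done" then (fc, fs, true, hf)
            else if w = "+_failed" then (fc, fs, hd, true)
            else (fc, fs, hd, hf)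
          else (fc, fs, hd, hf)
        else (fc, fs, hd, hf))
      (fc, fs, hd, hf)
    = (fc.or (ws.filter (fun w => PySem.Str.startswith w char && PySem.Str.len w != 1)).head?,
       fs.or ((ws.filter (fun w => PySem.Str.startswith w char && PySem.Str.len w != 1)).filter
                (fun x => PySem.Str.startswith x "+_")).head?,
       hd || (ws.filter (fun w => PySem.Str.startswith w char && PySem.Str.len w != 1)).contains "+_done",
       hf || (ws.filter (fun w => PySem.Str.startswith w char && PySem.Str.len w != 1)).contains "+_failed") := by
  induction ws generalizing fc fs hd hf with
  | nil => simp
  | cons w ws ih =>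
    simp only [List.foldl_cons, List.filter_cons]
    by_cases hp : (PySem.Str.startswith w char && PySem.Str.len w != 1) = true
    · simp only [hp, if_true]
      by_cases hq : PySem.Str.startswith w "+_" = true
      · have hq' : PySem.Chars.startswith w.toList ['+', '_'] = true := by simpa using hq
        simp only [hq, if_true]
        by_cases hdone : w = "+_done"
        · subst hdone
          simp only [if_true]
          rw [ih]
          cases fc <;> cases fs <;>
            simp [Option.or,
              (by decide : PySem.Chars.startswith ['+', '_', 'd', 'o', 'n', 'e'] ['+', '_'] = true)]
        · by_cases hfail : w = "+_failed"
          · subst hfail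
            simp only [hdone, if_false, if_true]
            rw [ih]
            cases fc <;> cases fs <;>
              simp [Option.or, Ne.symm hdone,
                (by decide : PySem.Chars.startswith ['+', '_', 'f', 'a', 'i', 'l', 'e', 'd'] ['+', '_'] = true)]
          · simp only [hdone, hfail, if_false]
            rw [ih]
            cases fc <;> cases fs <;>
              simp [Option.or, hq', Ne.symm hdone, Ne.symm hfail]
      · have hq' : PySem.Chars.startswith w.toList ['+', '_'] = false := by
          simpa using hq
        have hd2 : "+_done" ≠ w := by rintro rfl; exact hq rfl
        have hf2 : "+_failed" ≠ w := by rintro rfl; exact hq rfl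
        simp only [hq]
        rw [ih]
        cases fc <;> cases fs <;> simp [Option.or, hq', hd2, hf2]
    · simp only [hp]
      rw [ih]
      simp

-- the two key computations agree
theorem pvKey_eq (t char : String) : pvKeyA t char = pvGetKey t char := by
  unfold pvKeyA pvGetKey
  rw [pvFold_char]
  simp only [PySem.List.foldl_append_if, List.nil_append, List.map_id',
    Option.none_or, Bool.false_or]
  generalize (PySem.Str.split₀ t).filter
      (fun w => PySem.Str.startswith w char && PySem.Str.len w != 1) = cands
  cases hq : cands.filter (fun x => PySem.Str.startswith x "+_") with
  | nil =>
      simp only [List.head?_nil]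
      cases cands <;>
        simp only [List.headD_nil, List.headD_cons, List.head?_nil, List.head?_cons,
          Option.getD_none, Option.getD_some]
  | cons s rest =>
      simp only [List.head?_cons]

-- ===== VERDICT (by name: the statement is the Claim_ definition above) =====
theorem sort_tasks_spec : Claim_equal_sort_tasks := by
  intro tasks char _
  unfold Spec_sort_tasks sort_tasks sort_tasks_alt
  have hstep : (fun (d : PySem.Dict String (List String)) t =>
      let k := pvKeyA t char
      let d := if d.contains k = false then d.insert k [] else d
      d.modify k [] (fun l => l ++ [t]))
    = (fun (d : PySem.Dict String (List String)) t =>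
      (d.setdefault (pvGetKey t char) []).modify (pvGetKey t char) [] (fun l => l ++ [t])) := by
    funext d t
    rw [← pvKey_eq]
    by_cases hc : d.contains (pvKeyA t char) = true
    · rw [PySem.Dict.setdefault_of_contains _ _ hc]
      simp [hc]
    · have hc' : d.contains (pvKeyA t char) = false := by simpa using hc
      rw [PySem.Dict.setdefault_of_not_contains _ _ hc']
      simp [hc']
  rw [hstep]
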